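-- pv_equiv track=rewrite | github.com/yasufumi-nakata/Pytra | src/pytra/compiler/east_parts/core.py | _sh_split_args_with_offsets
-- ===== SOURCE A (Python) =====
-- def _sh_split_args_with_offsets(arg_text: str) -> list[tuple[str, int]]:
--     """引数文字列をトップレベルのカンマで分割し、相対オフセットも返す。"""
--     out: list[tuple[str, int]] = []
--     depth = 0
--     in_str: str | None = None
--     esc = False
--     start = 0
--     for i, ch in enumerate(arg_text):
--         if in_str is not None:
--             if esc:
--                 esc = False
--             elif ch == "\\":
--                 esc = True
--             elif ch == in_str:
--                 in_str = None
--             continue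
--         if ch in {"'", '"'}:
--             in_str = ch
--             continue
--         if ch in {"(", "[", "{"}:
--             depth += 1
--             continue
--         if ch in {")", "]", "}"}:
--             depth -= 1
--             continue
--         if ch == "," and depth == 0:
--             part = arg_text[start:i]
--             out.append((part.strip(), start + (len(part) - len(part.lstrip()))))
--             start = i + 1
--     tail = arg_text[start:]
--     if tail.strip() != "":
--         out.append((tail.strip(), start + (len(tail) - len(tail.lstrip()))))
--     return out
-- ===== SOURCE B (Python) =====
-- def _sh_split_args_with_offsets(arg_text: str) -> list[tuple[str, int]]:
--     """Two-pass version: collect top-level comma positions, then slice segments."""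
--     # pass 1: positions of top-level commas
--     commas: list[int] = []
--     depth = 0
--     in_str: str | None = None
--     esc = False
--     for i, ch in enumerate(arg_text):
--         if in_str is not None:
--             if esc:
--                 esc = False
--             elif ch == "\\":
--                 esc = True
--             elif ch == in_str:
--                 in_str = None
--         elif ch in ("'", '"'):
--             in_str = ch
--         elif ch in "([{":
--             depth += 1
--         elif ch in ")]}":
--             depth -= 1
--         elif ch == "," and depth == 0:
--             commas.append(i)
--     # pass 2: slice the segments between consecutive boundaries
--     out: list[tuple[str, int]] = []
--     bounds = [-1] + commas + [len(arg_text)]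
--     for k in range(len(bounds) - 1):
--         lo = bounds[k] + 1
--         seg = arg_text[lo:bounds[k + 1]]
--         item = (seg.strip(), lo + (len(seg) - len(seg.lstrip())))
--         if k < len(bounds) - 2:
--             out.append(item)            # intermediate segments, even if empty
--         elif seg.strip() != "":
--             out.append(item)            # trailing segment only if non-blank
--     return out
-- ===== Notes on version B (the rewrite author's own statement) =====
-- stated objective: alternative
-- what changed: Replaces A's single fused scan (which appends parts and tracks the segment start while scanning) by two separate passes: one scan that only records top-level comma indices, then a boundary loop that slices and strips each segment between consecutive boundaries.
import Mathlib
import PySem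

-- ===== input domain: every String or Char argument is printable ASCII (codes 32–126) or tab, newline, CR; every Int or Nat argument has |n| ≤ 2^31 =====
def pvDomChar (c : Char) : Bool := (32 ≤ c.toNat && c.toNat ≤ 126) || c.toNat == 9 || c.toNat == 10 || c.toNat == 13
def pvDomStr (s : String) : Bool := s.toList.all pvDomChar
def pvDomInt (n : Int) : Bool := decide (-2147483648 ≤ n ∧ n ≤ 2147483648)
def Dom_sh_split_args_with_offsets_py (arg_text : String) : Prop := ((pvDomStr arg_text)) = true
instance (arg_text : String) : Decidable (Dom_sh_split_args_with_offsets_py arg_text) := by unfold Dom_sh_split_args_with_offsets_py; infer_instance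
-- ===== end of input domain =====

-- B replaces A's fused split-while-scanning loop by two passes (collect top-level comma
-- indices, then slice segments between boundaries); objective: alternative decomposition.


-- ===== PORT A =====
-- A's single loop: state (out, depth, in_str, esc, start); appends a stripped part
-- (with offset = start + leading whitespace) at each top-level comma, then the tail
-- if its strip is nonempty.  arg_text[start:i] is PySem.List.slice on the code points.
def shA_loop (s : List Char) (i : Nat) (rest : List Char)
    (out : List (String × Int)) (depth : Int) (in_str : Option Char) (esc : Bool)
    (start : Nat) : List (String × Int) :=
  match rest with
  | [] =>
      let tail := PySem.List.slice s (some (start : Int)) none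
      if String.ofList (PySem.Chars.strip tail) ≠ "" then
        out ++ [(String.ofList (PySem.Chars.strip tail),
                 (start : Int) + ((tail.length : Int) - ((PySem.Chars.lstrip tail).length : Int)))]
      else out
  | ch :: rest' =>
      match in_str with
      | some q =>
          if esc then shA_loop s (i+1) rest' out depth (some q) false start
          else if ch = '\\' then shA_loop s (i+1) rest' out depth (some q) true start
          else if ch = q then shA_loop s (i+1) rest' out depth none false start
          else shA_loop s (i+1) rest' out depth (some q) false start
      | none =>
          if ch = '\'' ∨ ch = '"' then shA_loop s (i+1) rest' out depth (some ch) esc start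
          else if ch = '(' ∨ ch = '[' ∨ ch = '{' then shA_loop s (i+1) rest' out (depth+1) none esc start
          else if ch = ')' ∨ ch = ']' ∨ ch = '}' then shA_loop s (i+1) rest' out (depth-1) none esc start
          else if ch = ',' ∧ depth = 0 then
            let part := PySem.List.slice s (some (start : Int)) (some (i : Int))
            shA_loop s (i+1) rest'
              (out ++ [(String.ofList (PySem.Chars.strip part),
                        (start : Int) + ((part.length : Int) - ((PySem.Chars.lstrip part).length : Int)))])
              depth none esc (i+1)
          else shA_loop s (i+1) rest' out depth none esc start

def sh_split_args_with_offsets_py (arg_text : String) : List (String × Int) :=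
  shA_loop arg_text.toList 0 arg_text.toList [] 0 none false 0

-- ===== PORT B =====
-- Pass 1: record the indices of top-level commas (same scanner state, no slicing).
def shB_scan (i : Nat) (rest : List Char) (depth : Int) (in_str : Option Char) (esc : Bool)
    (commas : List Nat) : List Nat :=
  match rest with
  | [] => commas
  | ch :: rest' =>
      match in_str with
      | some q =>
          if esc then shB_scan (i+1) rest' depth (some q) false commas
          else if ch = '\\' then shB_scan (i+1) rest' depth (some q) true commas
          else if ch = q then shB_scan (i+1) rest' depth none false commas
          else shB_scan (i+1) rest' depth (some q) false commas
      | none =>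
          if ch = '\'' ∨ ch = '"' then shB_scan (i+1) rest' depth (some ch) esc commas
          else if ch = '(' ∨ ch = '[' ∨ ch = '{' then shB_scan (i+1) rest' (depth+1) none esc commas
          else if ch = ')' ∨ ch = ']' ∨ ch = '}' then shB_scan (i+1) rest' (depth-1) none esc commas
          else if ch = ',' ∧ depth = 0 then shB_scan (i+1) rest' depth none esc (commas ++ [i])
          else shB_scan (i+1) rest' depth none esc commas

-- Pass 2: walk consecutive boundary pairs; lo (= previous boundary + 1) is carried.
-- Intermediate segments are always emitted; the final one only if its strip is nonempty.
def shB_emit (s : List Char) (lo : Nat) (commas : List Nat) : List (String × Int) :=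
  match commas with
  | [] =>
      let seg := PySem.List.slice s (some (lo : Int)) (some (s.length : Int))
      if String.ofList (PySem.Chars.strip seg) ≠ "" then
        [(String.ofList (PySem.Chars.strip seg),
          (lo : Int) + ((seg.length : Int) - ((PySem.Chars.lstrip seg).length : Int)))]
      else []
  | c :: cs =>
      let seg := PySem.List.slice s (some (lo : Int)) (some (c : Int))
      (String.ofList (PySem.Chars.strip seg),
       (lo : Int) + ((seg.length : Int) - ((PySem.Chars.lstrip seg).length : Int)))
        :: shB_emit s (c+1) cs

def sh_split_args_with_offsets_py_alt (arg_text : String) : List (String × Int) :=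
  shB_emit arg_text.toList 0 (shB_scan 0 arg_text.toList 0 none false [])

-- ===== PRECONDITION & SPEC =====
def Spec_sh_split_args_with_offsets_py (arg_text : String) (out : List (String × Int)) : Prop := out = sh_split_args_with_offsets_py_alt arg_text
instance (arg_text : String) (out : List (String × Int)) : Decidable (Spec_sh_split_args_with_offsets_py arg_text out) := by unfold Spec_sh_split_args_with_offsets_py; infer_instance

-- ===== CLAIM (what is proved, stated in full; the proofs are below) =====
def Claim_equal_sh_split_args_with_offsets_py : Prop := ∀ (arg_text : String), Dom_sh_split_args_with_offsets_py arg_text → Spec_sh_split_args_with_offsets_py arg_text (sh_split_args_with_offsets_py arg_text)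

-- ===== LEMMAS AND PROOFS =====

-- B's scanner only appends to its accumulator.
theorem shB_scan_acc (rest : List Char) : ∀ (i : Nat) (depth : Int) (in_str : Option Char)
    (esc : Bool) (commas : List Nat),
    shB_scan i rest depth in_str esc commas = commas ++ shB_scan i rest depth in_str esc [] := by
  induction rest with
  | nil => intro i depth in_str esc commas; simp [shB_scan]
  | cons ch rest' ih =>
      intro i depth in_str esc commas
      match in_str with
      | some q =>
          simp only [shB_scan]
          split_ifs <;> apply ih
      | none =>
          simp only [shB_scan]
          split_ifs <;>
            first
              | apply ih
              | (simp only [List.nil_append]; rw [ih _ _ _ _ (commas ++ [i]), ih _ _ _ _ ([i] : List Nat)]; simp)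

-- slicing to the end equals slicing to the length
theorem slice_to_length (s : List Char) (lo : Nat) :
    PySem.List.slice s (some (lo : Int)) (some (s.length : Int)) =
    PySem.List.slice s (some (lo : Int)) none := by
  rw [PySem.List.slice_natCast, PySem.List.slice_from_natCast]
  exact List.take_of_length_le (by simp)

-- Main invariant: A's loop from any state equals the already-emitted parts followed by
-- B's emission of the comma indices that B's scanner finds from the same state.
theorem loop_eq (s : List Char) (rest : List Char) : ∀ (i : Nat)
    (out : List (String × Int)) (depth : Int) (in_str : Option Char) (esc : Bool) (start : Nat),
    shA_loop s i rest out depth in_str esc start =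
      out ++ shB_emit s start (shB_scan i rest depth in_str esc []) := by
  induction rest with
  | nil =>
      intro i out depth in_str esc start
      simp only [shA_loop, shB_scan, shB_emit, slice_to_length]
      split_ifs <;> simp
  | cons ch rest' ih =>
      intro i out depth in_str esc start
      match in_str with
      | some q =>
          simp only [shA_loop, shB_scan]
          split_ifs <;> apply ih
      | none =>
          simp only [shA_loop, shB_scan]
          split_ifs <;>
            first
              | apply ih
              | (simp only [List.nil_append]
                 rw [shB_scan_acc _ _ _ _ _ ([i] : List Nat), ih]
                 simp [shB_emit])

-- ===== VERDICT (by name: the statement is the Claim_ definition above) =====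
theorem sh_split_args_with_offsets_py_spec : Claim_equal_sh_split_args_with_offsets_py := by
  intro arg_text _
  unfold Spec_sh_split_args_with_offsets_py sh_split_args_with_offsets_py
    sh_split_args_with_offsets_py_alt
  rw [loop_eq]
  simp
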